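-- pv_equiv track=rewrite | github.com/wherby/code | contest/00000c361d112/c395/q4/t4.py | sumdist
-- ===== SOURCE A (Python) =====
-- from collections import defaultdict,deque
--
-- def sumdist(arr):
--     n = len(arr)
--     last = defaultdict(lambda: -1)
--     res = 0
--     for i in range(n):
--         res += (i - last[arr[i]]) * (n - i)
--         last[arr[i]] = i
--     return res
-- ===== SOURCE B (Python) =====
-- def sumdist(arr):
--     n = len(arr)
--     res = 0
--     for i, v in enumerate(arr):
--         prev = -1
--         for j in range(i - 1, -1, -1):
--             if arr[j] == v:
--                 prev = j
--                 break
--         res += (i - prev) * (n - i)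
--     return res
-- ===== Notes on version B (the rewrite author's own statement) =====
-- stated objective: alternative
-- what changed: Replaces A's single streaming pass that threads a last-occurrence defaultdict through the loop with a dict-free decomposition: for each position, the previous equal value is found by a direct backward scan with break, and the weighted gaps are summed per element.
import Mathlib
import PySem

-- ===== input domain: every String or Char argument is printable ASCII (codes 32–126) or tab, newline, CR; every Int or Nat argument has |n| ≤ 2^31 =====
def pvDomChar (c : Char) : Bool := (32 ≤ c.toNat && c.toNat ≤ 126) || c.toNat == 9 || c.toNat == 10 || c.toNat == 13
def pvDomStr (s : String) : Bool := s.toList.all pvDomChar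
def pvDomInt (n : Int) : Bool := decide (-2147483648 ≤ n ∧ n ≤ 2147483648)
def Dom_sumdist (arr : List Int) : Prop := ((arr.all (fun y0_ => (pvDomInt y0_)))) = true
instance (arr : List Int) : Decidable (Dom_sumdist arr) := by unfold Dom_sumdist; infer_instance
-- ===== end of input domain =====

-- B replaces A's streaming last-occurrence dict by a dict-free per-element backward scan
-- for the previous equal value (alternative decomposition, not faster).

-- ===== PORT A =====
-- A: one forward pass; `last` is a defaultdict(-1) of last occurrence; the defaultdict read
-- last[arr[i]] is ported as getD with default -1 (the implicit default insertion is value-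
-- equivalent since the dict is only read through getD before being overwritten).
def sumdist (arr : List Int) : Int :=
  let n : Int := arr.length
  ((PySem.List.pyRange 0 n 1).foldl
    (fun (st : PySem.Dict Int Int × Int) i =>
      (st.1.insert (PySem.List.pyGetD arr i 0) i,
       st.2 + (i - st.1.getD (PySem.List.pyGetD arr i 0) (-1)) * (n - i)))
    (PySem.Dict.empty, 0)).2

-- ===== PORT B =====
-- B helper: the inner `for j in range(i-1, -1, -1): if arr[j] == v: prev = j; break` loop
-- (prev stays -1 when the scan falls through).
def findPrev (arr : List Int) (v : Int) : List Int → Int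
  | [] => -1
  | j :: js => if PySem.List.pyGetD arr j 0 == v then j else findPrev arr v js

def sumdist_alt (arr : List Int) : Int :=
  let n : Int := arr.length
  (PySem.List.enumerate arr).foldl
    (fun res p =>
      res + (p.1 - findPrev arr p.2 (PySem.List.pyRange (p.1 - 1) (-1) (-1))) * (n - p.1))
    0

-- ===== PRECONDITION & SPEC =====
def Spec_sumdist (arr : List Int) (out : Int) : Prop := out = sumdist_alt arr
instance (arr : List Int) (out : Int) : Decidable (Spec_sumdist arr out) := by unfold Spec_sumdist; infer_instance

-- ===== CLAIM (what is proved, stated in full; the proofs are below) =====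
def Claim_equal_sumdist : Prop := ∀ (arr : List Int), Dom_sumdist arr → Spec_sumdist arr (sumdist arr)

-- ===== LEMMAS AND PROOFS =====

-- the per-index term both programs add
def pvTerm (arr : List Int) (j : Int) : Int :=
  (j - findPrev arr (PySem.List.pyGetD arr j 0) (PySem.List.pyRange (j - 1) (-1) (-1)))
    * ((arr.length : Int) - j)

-- A's loop invariant: after the prefix [0, k) the dict answers exactly the backward scan
theorem sumdist_loopA (arr : List Int) :
    ∀ (m : Nat) (k : Int) (d : PySem.Dict Int Int) (res : Int),
      0 ≤ k → k + m = (arr.length : Int) →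
      (∀ v, d.getD v (-1) = findPrev arr v (PySem.List.pyRange (k - 1) (-1) (-1))) →
      ((PySem.List.pyRange k (arr.length : Int) 1).foldl
        (fun (st : PySem.Dict Int Int × Int) i =>
          (st.1.insert (PySem.List.pyGetD arr i 0) i,
           st.2 + (i - st.1.getD (PySem.List.pyGetD arr i 0) (-1)) * ((arr.length : Int) - i)))
        (d, res)).2
      = res + ((PySem.List.pyRange k (arr.length : Int) 1).map (pvTerm arr)).sum := by
  intro m
  induction m with
  | zero =>
      intro k d res hk hkm _
      rw [PySem.List.pyRange_one_eq_nil (by omega)]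
      simp
  | succ m ih =>
      intro k d res hk hkm hinv
      rw [PySem.List.pyRange_one_cons (by omega)]
      simp only [List.foldl_cons, List.map_cons, List.sum_cons]
      rw [ih (k + 1) _ _ (by omega) (by omega) ?_]
      · rw [hinv]
        unfold pvTerm
        ring
      · intro v
        rw [PySem.Dict.getD_insert]
        have hcons : PySem.List.pyRange (k + 1 - 1) (-1) (-1)
            = k :: PySem.List.pyRange (k - 1) (-1) (-1) := by
          have : k + 1 - 1 = k := by ring
          rw [this, PySem.List.pyRange_neg_one_cons (by omega)]
        rw [hcons]
        unfold findPrev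
        by_cases hv : v = PySem.List.pyGetD arr k 0
        · simp [hv]
        · have hv' : ¬ ((PySem.List.pyGetD arr k 0 == v) = true) := by
            simp only [beq_iff_eq]
            exact fun h => hv h.symm
          rw [if_neg hv, if_neg hv', hinv]

theorem sumdist_spec : Claim_equal_sumdist := by
  intro arr _
  unfold Spec_sumdist sumdist sumdist_alt
  have hinit : ∀ v, (PySem.Dict.empty : PySem.Dict Int Int).getD v (-1)
      = findPrev arr v (PySem.List.pyRange (0 - 1) (-1) (-1)) := by
    intro v
    rw [PySem.List.pyRange_neg_one_eq_nil (by omega)]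
    simp [findPrev, PySem.Dict.getD_empty]
  rw [sumdist_loopA arr arr.length 0 PySem.Dict.empty 0 le_rfl (by omega) hinit,
      PySem.List.foldl_add (PySem.List.enumerate arr)
        (fun p : Int × Int =>
          (p.1 - findPrev arr p.2 (PySem.List.pyRange (p.1 - 1) (-1) (-1))) * ((arr.length : Int) - p.1)) 0,
      PySem.List.enumerate_eq_map_pyRange (d := 0), List.map_map]
  simp only [PySem.List.len_eq, zero_add]
  congr 1
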